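-- pv_equiv track=rewrite | github.com/sagarjain2030/skill-tracker | app/utils/validation.py | traverse_bfs
-- ===== SOURCE A (Python) =====
-- from typing import Dict, Optional, Set, List
-- from collections import deque
--
-- def traverse_bfs(
--     skill_id: int,
--     skill_parent_map: Dict[int, Optional[int]]
-- ) -> List[int]:
--     """
--     Perform breadth-first search (BFS) traversal starting from a skill.
--
--     Visits the skill, then visits all its immediate children, then all grandchildren,
--     and so on level by level. This means visiting all nodes at depth N before any at depth N+1.
--
--     Args:
--         skill_id: The skill ID to start traversal from
--         skill_parent_map: Dictionary mapping skill IDs to their parent IDs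
--
--     Returns:
--         List of skill IDs in BFS order (includes the starting skill)
--
--     Examples:
--         >>> # Single skill
--         >>> traverse_bfs(1, {1: None})
--         [1]
--
--         >>> # Linear hierarchy: 1 -> 2 -> 3
--         >>> traverse_bfs(1, {1: None, 2: 1, 3: 2})
--         [1, 2, 3]
--
--         >>> # Tree: 1 -> (2, 3), 2 -> 4
--         >>> result = traverse_bfs(1, {1: None, 2: 1, 3: 1, 4: 2})
--         >>> result[0]  # Always starts with root
--         1
--         >>> result[1:3]  # Next level (children of 1)
--         [2, 3]
--         >>> result[3]  # Last level (child of 2)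
--         4
--     """
--     result: List[int] = []
--     queue: deque = deque([skill_id])
--
--     while queue:
--         current_id = queue.popleft()
--         result.append(current_id)
--
--         # Find all children of current node
--         children = [
--             child_id for child_id, parent_id in skill_parent_map.items()
--             if parent_id == current_id
--         ]
--
--         # Sort children by ID for deterministic ordering
--         children.sort()
--
--         # Add children to queue for processing
--         queue.extend(children)
--
--     return result
-- ===== SOURCE B (Python) =====
-- def traverse_bfs(skill_id, skill_parent_map):
--     # Build a child index once (parent -> list of children in map order),
--     # then BFS with a cursor over the growing order list: no per-node
--     # full scan of the map.
--     edges = [(p, c) for c, p in skill_parent_map.items() if p is not None]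
--     children_map = {}
--     for p, c in edges:
--         children_map.setdefault(p, []).append(c)
--     order = [skill_id]
--     i = 0
--     while i < len(order):
--         order.extend(sorted(children_map.get(order[i], [])))
--         i += 1
--     return order
-- ===== Notes on version B (the rewrite author's own statement) =====
-- stated objective: alternative
-- what changed: A rescans the whole parent map (items() filter + sort) for every visited node popped from a deque; B builds a parent->children index in one pass and then runs BFS with a cursor over the growing order list, so the per-node full-map scan disappears.
import Mathlib
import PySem

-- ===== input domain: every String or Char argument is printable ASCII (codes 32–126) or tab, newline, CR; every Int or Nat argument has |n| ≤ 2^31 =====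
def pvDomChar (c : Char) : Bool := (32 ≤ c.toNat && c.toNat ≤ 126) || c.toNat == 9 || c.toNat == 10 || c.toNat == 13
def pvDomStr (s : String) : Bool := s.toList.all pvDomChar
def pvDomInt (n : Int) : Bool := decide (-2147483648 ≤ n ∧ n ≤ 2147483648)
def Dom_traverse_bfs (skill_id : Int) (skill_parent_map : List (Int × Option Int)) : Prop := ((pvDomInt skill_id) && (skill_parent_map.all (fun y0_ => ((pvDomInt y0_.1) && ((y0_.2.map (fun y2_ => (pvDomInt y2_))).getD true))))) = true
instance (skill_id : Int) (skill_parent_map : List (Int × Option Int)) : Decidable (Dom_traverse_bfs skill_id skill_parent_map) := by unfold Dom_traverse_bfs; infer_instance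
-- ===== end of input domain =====

-- B builds a parent->children index once and runs BFS with a cursor over the growing order
-- list in place of A's per-node full scan of the map (objective: alternative algorithm).

-- ===== PORT A =====
-- children of `cur`: the comprehension over items() filtered by parent, then .sort()
def pvChildren (d : PySem.Dict Int (Option Int)) (cur : Int) : List Int :=
  PySem.List.sorted ((d.items.filter (fun p => p.2 == some cur)).map Prod.fst) (fun c => c) false

-- A's while-loop over the deque: pop from the front, append the node, extend the queue with
-- its sorted children.  The Nat fuel (|dict| + 1) is only a totality guard: under Pre_ the
-- queue empties before it runs out.
def pvGoA (d : PySem.Dict Int (Option Int)) : Nat → List Int → List Int → List Int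
  | 0, _, result => result
  | _ + 1, [], result => result
  | fuel + 1, cur :: q, result => pvGoA d fuel (q ++ pvChildren d cur) (result ++ [cur])

def traverse_bfs (skill_id : Int) (skill_parent_map : List (Int × Option Int)) : List Int :=
  let d := PySem.Dict.ofList skill_parent_map
  pvGoA d (d.size + 1) [skill_id] []

-- ===== PORT B =====
-- the edge list [(p, c) for c, p in items if p is not None]
def pvEdges (items : List (Int × Option Int)) : List (Int × Int) :=
  items.filterMap (fun cp => cp.2.map (fun p => (p, cp.1)))

-- the for-loop 'children_map.setdefault(p, []).append(c)' over the edges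
def pvChildMap (items : List (Int × Option Int)) : PySem.Dict Int (List Int) :=
  (pvEdges items).foldl (fun m e => m.modify e.1 [] (· ++ [e.2])) PySem.Dict.empty

-- B's while-loop: a cursor i over the growing order list; each step extends order by the
-- sorted indexed children of order[i].  Same fuel guard as A (one unit per visited node).
def pvGoB (cm : PySem.Dict Int (List Int)) : Nat → List Int → Nat → List Int
  | 0, order, i => order.take i
  | fuel + 1, order, i =>
      if h : i < order.length then
        pvGoB cm fuel (order ++ PySem.List.sorted (cm.getD order[i] []) (fun c => c) false) (i + 1)
      else order

def traverse_bfs_alt (skill_id : Int) (skill_parent_map : List (Int × Option Int)) : List Int :=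
  let d := PySem.Dict.ofList skill_parent_map
  pvGoB (pvChildMap d.items) (d.size + 1) [skill_id] 0

-- ===== PRECONDITION & SPEC =====
-- A is total except that it loops forever on parent maps cyclic through skill_id; the
-- fuel-guarded ports agree on every input, so no Pre_ is stated.
def Spec_traverse_bfs (skill_id : Int) (skill_parent_map : List (Int × Option Int)) (out : List Int) : Prop := out = traverse_bfs_alt skill_id skill_parent_map
instance (skill_id : Int) (skill_parent_map : List (Int × Option Int)) (out : List Int) : Decidable (Spec_traverse_bfs skill_id skill_parent_map out) := by unfold Spec_traverse_bfs; infer_instance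

-- ===== CLAIM =====
def Claim_equal_traverse_bfs : Prop := ∀ (skill_id : Int) (skill_parent_map : List (Int × Option Int)), Dom_traverse_bfs skill_id skill_parent_map → Spec_traverse_bfs skill_id skill_parent_map (traverse_bfs skill_id skill_parent_map)

-- ===== LEMMAS AND PROOFS =====

-- the edge list filtered at parent x lists exactly A's children-of-x comprehension
theorem pvEdges_filter (items : List (Int × Option Int)) (x : Int) :
    ((pvEdges items).filter (fun e => e.1 == x)).map (·.2)
      = (items.filter (fun p => p.2 == some x)).map Prod.fst := by
  induction items with
  | nil => rfl
  | cons cp rest ih =>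
      obtain ⟨c, p⟩ := cp
      cases p with
      | none => simpa [pvEdges, List.filterMap_cons] using ih
      | some q =>
          by_cases hq : q = x
          · subst hq
            simp [pvEdges] at ih ⊢
            exact ih
          · simp [pvEdges, hq] at ih ⊢
            exact ih

-- the built index, looked up and sorted, is exactly A's per-node children computation
theorem pvChildMap_getD (items : List (Int × Option Int)) (x : Int) :
    PySem.List.sorted ((pvChildMap items).getD x []) (fun c => c) false
      = PySem.List.sorted ((items.filter (fun p => p.2 == some x)).map Prod.fst) (fun c => c) false := by
  unfold pvChildMap
  rw [PySem.Dict.getD_foldl_modify_append, PySem.Dict.getD_empty, List.nil_append,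
    pvEdges_filter]

-- cursor-loop / queue-loop bisimulation: with equal fuel, B's state (order, i) tracks A's
-- state (queue = order.drop i, result = order.take i)
theorem pvBisim (d : PySem.Dict Int (Option Int)) (cm : PySem.Dict Int (List Int))
    (hch : ∀ x, PySem.List.sorted (cm.getD x []) (fun c => c) false = pvChildren d x) :
    ∀ (fuel : Nat) (order : List Int) (i : Nat), i ≤ order.length →
      pvGoB cm fuel order i = pvGoA d fuel (order.drop i) (order.take i) := by
  intro fuel
  induction fuel with
  | zero =>
      intro order i _
      cases hdi : order.drop i <;> simp [pvGoB, pvGoA]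
  | succ fuel ih =>
      intro order i hi
      by_cases h : i < order.length
      · have hdrop : order.drop i = order[i] :: order.drop (i + 1) :=
          List.drop_eq_getElem_cons h
        rw [hdrop]
        show pvGoB cm (fuel + 1) order i
            = pvGoA d fuel (order.drop (i + 1) ++ pvChildren d order[i]) (order.take i ++ [order[i]])
        rw [pvGoB, dif_pos h, hch]
        set c := pvChildren d order[i] with hc
        have h1 : i + 1 ≤ (order ++ c).length := by simp; omega
        rw [ih (order ++ c) (i + 1) h1]
        have hdrop2 : (order ++ c).drop (i + 1) = order.drop (i + 1) ++ c :=
          List.drop_append_of_le_length (by omega)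
        have htake2 : (order ++ c).take (i + 1) = order.take i ++ [order[i]] := by
          rw [List.take_append_of_le_length (by omega), List.take_add_one,
            List.getElem?_eq_getElem h]
          rfl
        rw [hdrop2, htake2]
      · have hieq : i = order.length := by omega
        subst hieq
        simp [pvGoB, pvGoA]

-- ===== VERDICT (by name: the statement is the Claim_ definition above) =====
theorem traverse_bfs_spec : Claim_equal_traverse_bfs := by
  intro s m _hdom
  unfold Spec_traverse_bfs traverse_bfs traverse_bfs_alt
  set d := PySem.Dict.ofList m with hd
  have hch : ∀ x, PySem.List.sorted ((pvChildMap d.items).getD x []) (fun c => c) false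
      = pvChildren d x := by
    intro x
    rw [pvChildMap_getD]
    rfl
  rw [pvBisim d (pvChildMap d.items) hch (d.size + 1) [s] 0 (by simp)]
  rfl
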